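-- pv_equiv track=rewrite | github.com/FOI-Bioinformatics/baitUtils | baitUtils/check.py | split_sequence_at_n
-- ===== SOURCE A (Python) =====
-- from typing import Dict, List, Tuple
--
-- def split_sequence_at_n(sequence: str) -> List[Tuple[int, str]]:
--     """Split a sequence at 'N' bases. Return list of (start_offset, subsequence)."""
--     parts = []
--     current_start = 0
--     current_seq = []
--
--     for i, base in enumerate(sequence):
--         if base.upper() == 'N':
--             if current_seq:
--                 parts.append((current_start, ''.join(current_seq)))
--                 current_seq = []
--             current_start = i + 1
--         else:
--             current_seq.append(base)
--
--     if current_seq: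
--         parts.append((current_start, ''.join(current_seq)))
--
--     return parts
-- ===== SOURCE B (Python) =====
-- import re
-- from typing import List, Tuple
--
-- def split_sequence_at_n(sequence: str) -> List[Tuple[int, str]]:
--     """Split a sequence at 'N' bases. Return list of (start_offset, subsequence)."""
--     return [(m.start(), m.group()) for m in re.finditer(r'[^Nn]+', sequence)]
-- ===== Notes on version B (the rewrite author's own statement) =====
-- stated objective: idiomatic
-- what changed: Replaces the per-character accumulator loop (current_start/current_seq/join) with a single re.finditer over maximal [^Nn]+ runs, reading each run's offset from the match object.
import Mathlib
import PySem

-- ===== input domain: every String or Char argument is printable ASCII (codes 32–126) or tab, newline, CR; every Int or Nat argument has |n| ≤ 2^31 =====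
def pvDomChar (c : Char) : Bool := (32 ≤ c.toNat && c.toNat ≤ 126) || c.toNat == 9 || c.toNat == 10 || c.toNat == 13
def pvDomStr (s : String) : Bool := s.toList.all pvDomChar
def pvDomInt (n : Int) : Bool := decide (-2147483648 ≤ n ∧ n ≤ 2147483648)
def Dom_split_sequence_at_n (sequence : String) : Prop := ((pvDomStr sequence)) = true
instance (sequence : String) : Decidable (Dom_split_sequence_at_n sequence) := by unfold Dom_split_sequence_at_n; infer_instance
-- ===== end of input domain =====

-- B replaces A's per-character accumulator loop with a run-at-a-time scan (Python: re.finditer over [^Nn]+); idiomatic, same O(n) cost.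

-- ===== PORT A =====
-- the for-loop of A as structural recursion over the same state (parts, current_start, current_seq), i the enumerate index
def pvALoop (parts : List (Int × String)) (cstart : Int) (cur : List Char)
    (i : Nat) (cs : List Char) : List (Int × String) :=
  match cs with
  | [] => if cur.isEmpty then parts else parts ++ [(cstart, String.ofList cur)]
  | c :: rest =>
    if c.toUpper = 'N' then
      pvALoop (if cur.isEmpty then parts else parts ++ [(cstart, String.ofList cur)])
        ((i : Int) + 1) [] (i + 1) rest
    else
      pvALoop parts cstart (cur ++ [c]) (i + 1) rest

def split_sequence_at_n (sequence : String) : List (Int × String) :=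
  pvALoop [] 0 [] 0 sequence.toList

-- ===== PORT B =====
-- a character matched by the regex class [^Nn]
def pvNotN (c : Char) : Bool := !(c == 'N' || c == 'n')

-- finditer over [^Nn]+ : consume one maximal run per step, emit (start, run)
def pvBRuns (i : Nat) (cs : List Char) : List (Int × String) :=
  match cs with
  | [] => []
  | c :: rest =>
    if pvNotN c then
      ((i : Int), String.ofList (c :: rest.takeWhile pvNotN)) ::
        pvBRuns (i + 1 + (rest.takeWhile pvNotN).length) (rest.dropWhile pvNotN)
    else
      pvBRuns (i + 1) rest
termination_by cs.length
decreasing_by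
  · exact Nat.lt_succ_of_le (List.length_dropWhile_le _ _)
  · simp

def split_sequence_at_n_alt (sequence : String) : List (Int × String) :=
  pvBRuns 0 sequence.toList

-- ===== PRECONDITION & SPEC =====
def Spec_split_sequence_at_n (sequence : String) (out : List (Int × String)) : Prop := out = split_sequence_at_n_alt sequence
instance (sequence : String) (out : List (Int × String)) : Decidable (Spec_split_sequence_at_n sequence out) := by unfold Spec_split_sequence_at_n; infer_instance

-- ===== CLAIM (what is proved, stated in full; the proofs are below) =====
def Claim_equal_split_sequence_at_n : Prop := ∀ (sequence : String), Dom_split_sequence_at_n sequence → Spec_split_sequence_at_n sequence (split_sequence_at_n sequence)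

-- ===== LEMMAS AND PROOFS =====

-- A's test `base.upper() == 'N'` holds exactly on the characters B's class [^Nn] excludes
theorem pv_toUpper_N (c : Char) : (c.toUpper = 'N') ↔ (pvNotN c = false) := by
  simp only [pvNotN, Bool.not_eq_false', Bool.or_eq_true, beq_iff_eq, Char.ext_iff, Char.toUpper]
  have hc : c.val.toNat < 2 ^ 32 := c.val.toNat_lt_size
  split_ifs with h
  · simp only [UInt32.le_iff_toNat_le] at h
    simp only [← UInt32.toNat_inj, UInt32.toNat_add, UInt32.toNat_sub,
      show ('a' : Char).val.toNat = 97 from rfl, show ('A' : Char).val.toNat = 65 from rfl,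
      show ('z' : Char).val.toNat = 122 from rfl, show ('N' : Char).val.toNat = 78 from rfl,
      show ('n' : Char).val.toNat = 110 from rfl] at h ⊢
    omega
  · simp only [UInt32.le_iff_toNat_le, not_and, not_le] at h
    simp only [← UInt32.toNat_inj,
      show ('a' : Char).val.toNat = 97 from rfl,
      show ('z' : Char).val.toNat = 122 from rfl, show ('N' : Char).val.toNat = 78 from rfl,
      show ('n' : Char).val.toNat = 110 from rfl] at h ⊢
    omega

-- the already-emitted parts prefix factors out of A's loop
theorem pvALoop_parts (cs : List Char) : ∀ parts cstart cur i,
    pvALoop parts cstart cur i cs = parts ++ pvALoop [] cstart cur i cs := by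
  induction cs with
  | nil =>
    intro parts cstart cur i
    by_cases h : cur.isEmpty <;> simp [pvALoop, h]
  | cons c rest ih =>
    intro parts cstart cur i
    have key : ∀ (q : List (Int × String)) (j : Int) (k : Nat),
        pvALoop (parts ++ q) j [] k rest = parts ++ pvALoop q j [] k rest := by
      intro q j k
      rw [ih, ih (parts := q), List.append_assoc]
    by_cases h : c.toUpper = 'N'
    · by_cases h2 : cur.isEmpty
      · simpa [pvALoop, h, h2] using ih parts ((i : Int) + 1) [] (i + 1)
      · simpa [pvALoop, h, h2] using key [(cstart, String.ofList cur)] ((i : Int) + 1) (i + 1)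
    · simpa [pvALoop, h] using ih parts cstart (cur ++ [c]) (i + 1)

-- main invariant: A's loop = B's run scan, for empty and for pending accumulator
theorem pvALoop_eq_runs (cs : List Char) :
    (∀ i : Nat, pvALoop [] (i : Int) [] i cs = pvBRuns i cs) ∧
    (∀ (cstart : Int) (cur : List Char) (i : Nat), ¬ cur.isEmpty →
      pvALoop [] cstart cur i cs =
        (cstart, String.ofList (cur ++ cs.takeWhile pvNotN)) ::
          pvBRuns (i + (cs.takeWhile pvNotN).length) (cs.dropWhile pvNotN)) := by
  induction cs with
  | nil =>
    constructor
    · intro i; simp [pvALoop, pvBRuns]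
    · intro cstart cur i hcur
      simp only [Bool.not_eq_true] at hcur
      simp [pvALoop, pvBRuns, hcur]
  | cons c rest ih =>
    obtain ⟨ih1, ih2⟩ := ih
    constructor
    · intro i
      by_cases h : pvNotN c = true
      · have hA : ¬ (c.toUpper = 'N') := by rw [pv_toUpper_N]; simp [h]
        simp only [pvALoop, if_neg hA, pvBRuns, if_pos h, List.nil_append]
        rw [ih2 (i : Int) [c] (i + 1) (by simp)]
        simp [Nat.add_assoc, Nat.add_comm 1]
      · have hA : c.toUpper = 'N' := (pv_toUpper_N c).2 (by simpa using h)
        simp only [pvALoop, if_pos hA, pvBRuns, if_neg h, List.isEmpty_nil, if_true]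
        have := ih1 (i + 1)
        push_cast at this
        exact this
    · intro cstart cur i hcur
      by_cases h : pvNotN c = true
      · have hA : ¬ (c.toUpper = 'N') := by rw [pv_toUpper_N]; simp [h]
        simp only [pvALoop, if_neg hA]
        rw [ih2 cstart (cur ++ [c]) (i + 1) (by simp)]
        simp [h, Nat.add_assoc, Nat.add_comm 1]
      · have hA : c.toUpper = 'N' := (pv_toUpper_N c).2 (by simpa using h)
        simp only [Bool.not_eq_true] at hcur
        simp only [pvALoop, if_pos hA, hcur, Bool.false_eq_true, if_false]
        rw [pvALoop_parts]
        have := ih1 (i + 1)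
        push_cast at this
        rw [this]
        simp [pvBRuns, h]

-- ===== VERDICT (by name: the statement is the Claim_ definition above) =====
theorem split_sequence_at_n_spec : Claim_equal_split_sequence_at_n := by
  intro s _
  unfold Spec_split_sequence_at_n split_sequence_at_n split_sequence_at_n_alt
  simpa using (pvALoop_eq_runs s.toList).1 0
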